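-- pv_equiv track=rewrite | github.com/tomoriolu/IA02_project | gopher.py | adj_box_player
-- ===== SOURCE A (Python) =====
-- Cell = tuple[int, int]
--
-- ActionGopher = Cell
--
-- Player = int  # 1 ou 2
--
-- Grid = list[list[int]]
--
-- def adj_box(grid: Grid, ennemy_cell: list[Cell], limited: bool) -> list[Cell]:
--     "retourne les cases adjacentes à la case en paramètre"
--     list_cell: list[Cell] = []
--     from_row: int
--     from_col: int
--     n: int
--     list_cell_tmp: list[Cell]
--     for from_cell in ennemy_cell:
--
--         from_row, from_col = from_cell
--         n = len(grid)
--         list_cell_tmp = [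
--             (from_row - 1, from_col),
--             (from_row - 1, from_col + 1),
--             (from_row, from_col - 1),
--             (from_row, from_col + 1),
--             (from_row + 1, from_col - 1),
--             (from_row + 1, from_col),
--         ]
--         if limited == True:
--             for row, col in list_cell_tmp:
--                 if (
--                     0 <= row < n
--                     and 0 <= col < n
--                     and grid[row][col] == 0
--                     and (row, col) not in list_cell
--                 ):
--                     list_cell.append((row, col))
--         else:
--             for row, col in list_cell_tmp:
--                 if 0 <= row < n and 0 <= col < n and (row, col) not in list_cell:
--                     list_cell.append((row, col))
--     return list_cell
--
-- def adj_box_player(grid: Grid, list_cell: list[Cell], player: Player) -> list[ActionGopher]: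
--     "retourne les cases jouables par le joueur parmi la liste de cases"
--     test: bool = True
--     list_final: list[Cell] = []
--     for ele in list_cell:
--         play_box: list[Cell] = adj_box(grid, [ele], False)
--         for row, col in play_box:
--             if grid[row][col] == player and test:
--                 # list_cell.remove(ele)
--                 test = False
--         if test:
--             list_final.append(ele)
--         test = True
--     return list_final
-- ===== SOURCE B (Python) =====
-- def adj_box_player(grid, list_cell, player):
--     "retourne les cases jouables par le joueur parmi la liste de cases"
--     n = len(grid)
--     offsets = [(-1, 0), (-1, 1), (0, -1), (0, 1), (1, -1), (1, 0)]
--     forbidden = set()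
--     for r, row in enumerate(grid):
--         for c, v in enumerate(row[:n]):
--             if v == player:
--                 for dr, dc in offsets:
--                     forbidden.add((r + dr, c + dc))
--     return [ele for ele in list_cell if ele not in forbidden]
-- ===== Notes on version B (the rewrite author's own statement) =====
-- stated objective: alternative
-- what changed: B scans the grid once to build a set of all hex-neighbors of player-owned cells (using the symmetry of the offset set), then filters list_cell by one membership test per candidate, instead of A's per-candidate neighbor enumeration with a grid probe for each neighbor.
import Mathlib
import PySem

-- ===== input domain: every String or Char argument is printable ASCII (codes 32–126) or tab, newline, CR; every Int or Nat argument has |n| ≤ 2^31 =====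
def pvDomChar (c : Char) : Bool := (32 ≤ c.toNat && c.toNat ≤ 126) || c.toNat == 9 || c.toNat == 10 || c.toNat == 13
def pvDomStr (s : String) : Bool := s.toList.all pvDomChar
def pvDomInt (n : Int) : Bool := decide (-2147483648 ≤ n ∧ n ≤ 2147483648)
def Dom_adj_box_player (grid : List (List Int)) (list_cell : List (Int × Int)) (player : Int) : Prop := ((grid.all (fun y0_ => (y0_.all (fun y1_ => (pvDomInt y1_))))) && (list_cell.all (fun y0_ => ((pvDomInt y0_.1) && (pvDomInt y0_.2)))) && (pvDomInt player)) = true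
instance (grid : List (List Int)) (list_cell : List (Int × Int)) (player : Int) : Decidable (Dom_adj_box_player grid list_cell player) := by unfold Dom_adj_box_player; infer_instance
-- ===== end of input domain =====

-- B builds a set of all hex-neighbors of player cells in one grid scan, then filters list_cell by
-- membership, instead of A's per-candidate neighbor probing; alternative decomposition, not faster.

-- ===== PORT A =====
-- literal transliteration of the helper adj_box (grid[row][col] is read via pyGetD: on every
-- input admitted by Pre_ the index is in range, so the default 0 is never returned)
def adj_box (grid : List (List Int)) (ennemy_cell : List (Int × Int)) (limited : Bool) : List (Int × Int) :=
  ennemy_cell.foldl (fun list_cell from_cell =>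
    let from_row := from_cell.1
    let from_col := from_cell.2
    let n : Int := grid.length
    let list_cell_tmp : List (Int × Int) :=
      [(from_row - 1, from_col), (from_row - 1, from_col + 1), (from_row, from_col - 1),
       (from_row, from_col + 1), (from_row + 1, from_col - 1), (from_row + 1, from_col)]
    if limited = true then
      list_cell_tmp.foldl (fun acc rc =>
        if 0 ≤ rc.1 ∧ rc.1 < n ∧ 0 ≤ rc.2 ∧ rc.2 < n ∧
            PySem.List.pyGetD (PySem.List.pyGetD grid rc.1 []) rc.2 0 = 0 ∧ rc ∉ acc
        then acc ++ [rc] else acc) list_cell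
    else
      list_cell_tmp.foldl (fun acc rc =>
        if 0 ≤ rc.1 ∧ rc.1 < n ∧ 0 ≤ rc.2 ∧ rc.2 < n ∧ rc ∉ acc
        then acc ++ [rc] else acc) list_cell) []

def adj_box_player (grid : List (List Int)) (list_cell : List (Int × Int)) (player : Int) : List (Int × Int) :=
  (list_cell.foldl (fun st ele =>
    let play_box := adj_box grid [ele] false
    let test := play_box.foldl (fun t rc =>
      if PySem.List.pyGetD (PySem.List.pyGetD grid rc.1 []) rc.2 0 = player ∧ t = true then false else t) st.1
    (true, if test = true then st.2 ++ [ele] else st.2)) ((true : Bool), ([] : List (Int × Int)))).2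

-- ===== PORT B =====
def pvOffsets : List (Int × Int) := [(-1, 0), (-1, 1), (0, -1), (0, 1), (1, -1), (1, 0)]

def adj_box_player_alt (grid : List (List Int)) (list_cell : List (Int × Int)) (player : Int) : List (Int × Int) :=
  let n := grid.length
  -- row[:n] = row.take n, exact since n = len(grid) ≥ 0
  let forbidden : PySem.Set (Int × Int) :=
    (PySem.List.enumerate grid).foldl (fun fb rrow =>
      (PySem.List.enumerate (rrow.2.take n)).foldl (fun fb cv =>
        if cv.2 = player then
          pvOffsets.foldl (fun fb d => PySem.Set.add fb (rrow.1 + d.1, cv.1 + d.2)) fb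
        else fb) fb) PySem.Set.empty
  list_cell.filter (fun ele => !(PySem.Set.contains forbidden ele))

-- ===== PRECONDITION & SPEC =====
-- Pre_ excludes exactly the inputs on which A raises IndexError: some candidate cell has an
-- in-bounds neighbor (row, col) with 0 ≤ row, col < len(grid) whose column falls beyond the
-- actual length of row `row` (a ragged grid). A raises on every input outside Pre_.
def Pre_adj_box_player (grid : List (List Int)) (list_cell : List (Int × Int)) (player : Int) : Prop :=
  ∀ ele ∈ list_cell, ∀ d ∈ pvOffsets,
    0 ≤ ele.1 + d.1 → ele.1 + d.1 < (grid.length : Int) →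
    0 ≤ ele.2 + d.2 → ele.2 + d.2 < (grid.length : Int) →
    ele.2 + d.2 < ((grid.getD (ele.1 + d.1).toNat []).length : Int)
instance (grid : List (List Int)) (list_cell : List (Int × Int)) (player : Int) : Decidable (Pre_adj_box_player grid list_cell player) := by unfold Pre_adj_box_player; infer_instance

def pvWitness_adj_box_player : List (List Int) × (List (Int × Int)) × Int :=
  ([[0, 1], [0, 0]], [(0, 0), (1, 1)], 1)

def Spec_adj_box_player (grid : List (List Int)) (list_cell : List (Int × Int)) (player : Int) (out : List (Int × Int)) : Prop := out = adj_box_player_alt grid list_cell player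
instance (grid : List (List Int)) (list_cell : List (Int × Int)) (player : Int) (out : List (Int × Int)) : Decidable (Spec_adj_box_player grid list_cell player out) := by unfold Spec_adj_box_player; infer_instance

-- ===== CLAIM (what is proved, stated in full; the proofs are below) =====
def Claim_equal_adj_box_player : Prop := ∀ (grid : List (List Int)) (list_cell : List (Int × Int)) (player : Int), Dom_adj_box_player grid list_cell player → Pre_adj_box_player grid list_cell player → Spec_adj_box_player grid list_cell player (adj_box_player grid list_cell player)

-- ===== LEMMAS AND PROOFS =====

-- generic membership characterization of a fold that only ever adds elements
theorem pv_mem_foldl_step {α β : Type} (step : List α → β → List α) (Q : β → α → Prop)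
    (h : ∀ fb cv x, x ∈ step fb cv ↔ x ∈ fb ∨ Q cv x) (l : List β) (fb : List α) (x : α) :
    x ∈ l.foldl step fb ↔ x ∈ fb ∨ ∃ cv ∈ l, Q cv x := by
  induction l generalizing fb with
  | nil => simp
  | cons a l ih =>
    rw [List.foldl_cons, ih, h fb a x]
    constructor
    · rintro ((hx | hq) | ⟨cv, hcv, hQ⟩)
      · exact Or.inl hx
      · exact Or.inr ⟨a, by simp, hq⟩
      · exact Or.inr ⟨cv, List.mem_cons_of_mem _ hcv, hQ⟩
    · rintro (hx | ⟨cv, hcv, hQ⟩)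
      · exact Or.inl (Or.inl hx)
      · rcases List.mem_cons.mp hcv with rfl | hcv
        · exact Or.inl (Or.inr hQ)
        · exact Or.inr ⟨cv, hcv, hQ⟩

-- the dedup-append fold of adj_box keeps exactly the in-bounds elements
theorem pv_mem_adj_fold (n : Int) (l : List (Int × Int)) (acc : List (Int × Int)) (x : Int × Int) :
    x ∈ l.foldl (fun acc rc =>
        if 0 ≤ rc.1 ∧ rc.1 < n ∧ 0 ≤ rc.2 ∧ rc.2 < n ∧ rc ∉ acc then acc ++ [rc] else acc) acc
      ↔ x ∈ acc ∨ (x ∈ l ∧ 0 ≤ x.1 ∧ x.1 < n ∧ 0 ≤ x.2 ∧ x.2 < n) := by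
  induction l generalizing acc with
  | nil => simp
  | cons a l ih =>
    rw [List.foldl_cons, ih]
    by_cases h : 0 ≤ a.1 ∧ a.1 < n ∧ 0 ≤ a.2 ∧ a.2 < n ∧ a ∉ acc
    · rw [if_pos h]
      simp only [List.mem_append, List.mem_cons, List.not_mem_nil, or_false]
      obtain ⟨h1, h2, h3, h4, h5⟩ := h
      constructor
      · rintro ((hx | rfl) | ⟨hl, hb⟩)
        · exact Or.inl hx
        · exact Or.inr ⟨Or.inl rfl, h1, h2, h3, h4⟩
        · exact Or.inr ⟨Or.inr hl, hb⟩
      · rintro (hx | ⟨(rfl | hl), hb⟩)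
        · exact Or.inl (Or.inl hx)
        · exact Or.inl (Or.inr rfl)
        · exact Or.inr ⟨hl, hb⟩
    · rw [if_neg h]
      simp only [List.mem_cons]
      constructor
      · rintro (hx | ⟨hl, hb⟩)
        · exact Or.inl hx
        · exact Or.inr ⟨Or.inr hl, hb⟩
      · rintro (hx | ⟨(rfl | hl), hb⟩)
        · exact Or.inl hx
        · -- a itself in bounds: then h forces a ∈ acc
          obtain ⟨b1, b2, b3, b4⟩ := hb
          by_cases hmem : x ∈ acc
          · exact Or.inl hmem
          · exact absurd ⟨b1, b2, b3, b4, hmem⟩ h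
        · exact Or.inr ⟨hl, hb⟩

-- the sticky-false inner loop of A computes "no probed cell holds player"
theorem pv_sticky (grid : List (List Int)) (player : Int) (l : List (Int × Int)) (t : Bool) :
    l.foldl (fun t rc =>
        if PySem.List.pyGetD (PySem.List.pyGetD grid rc.1 []) rc.2 0 = player ∧ t = true then false else t) t
      = (t && !(l.any (fun rc => decide (PySem.List.pyGetD (PySem.List.pyGetD grid rc.1 []) rc.2 0 = player)))) := by
  induction l generalizing t with
  | nil => simp
  | cons a l ih =>
    rw [List.foldl_cons, ih]
    by_cases hP : PySem.List.pyGetD (PySem.List.pyGetD grid a.1 []) a.2 0 = player <;>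
      cases t <;> simp [hP]

-- negation closure of the offset set
theorem pv_neg_offsets {d : Int × Int} (hd : d ∈ pvOffsets) : (-d.1, -d.2) ∈ pvOffsets := by
  simp only [pvOffsets, List.mem_cons, List.not_mem_nil, or_false] at hd ⊢
  rcases hd with rfl | rfl | rfl | rfl | rfl | rfl <;> simp

-- membership in B's forbidden set
theorem pv_mem_forbidden (grid : List (List Int)) (player : Int) (x : Int × Int) :
    x ∈ (PySem.List.enumerate grid).foldl (fun fb rrow =>
        (PySem.List.enumerate (rrow.2.take grid.length)).foldl (fun fb cv =>
          if cv.2 = player then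
            pvOffsets.foldl (fun fb d => PySem.Set.add fb (rrow.1 + d.1, cv.1 + d.2)) fb
          else fb) fb) PySem.Set.empty
      ↔ ∃ rrow ∈ PySem.List.enumerate grid, ∃ cv ∈ PySem.List.enumerate (rrow.2.take grid.length),
          cv.2 = player ∧ ∃ d ∈ pvOffsets, x = (rrow.1 + d.1, cv.1 + d.2) := by
  rw [pv_mem_foldl_step _
    (fun rrow x => ∃ cv ∈ PySem.List.enumerate (rrow.2.take grid.length),
        cv.2 = player ∧ ∃ d ∈ pvOffsets, x = (rrow.1 + d.1, cv.1 + d.2))]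
  · simp [PySem.Set.empty]
  · intro fb rrow x
    rw [pv_mem_foldl_step _
      (fun cv x => cv.2 = player ∧ ∃ d ∈ pvOffsets, x = (rrow.1 + d.1, cv.1 + d.2))]
    intro fb cv x
    by_cases hp : cv.2 = player
    · rw [if_pos hp,
        pv_mem_foldl_step _ (fun d x => x = (rrow.1 + d.1, cv.1 + d.2))
          (fun fb d x => by rw [PySem.Set.mem_add])]
      simp [hp]
    · rw [if_neg hp]; simp [hp]

-- core bridge: "some in-bounds neighbor of ele holds player" = "ele is a neighbor of a player cell"
theorem pv_bridge (grid : List (List Int)) (player : Int) (ele : Int × Int)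
    (hpre : ∀ d ∈ pvOffsets,
      0 ≤ ele.1 + d.1 → ele.1 + d.1 < (grid.length : Int) →
      0 ≤ ele.2 + d.2 → ele.2 + d.2 < (grid.length : Int) →
      ele.2 + d.2 < ((grid.getD (ele.1 + d.1).toNat []).length : Int)) :
    ((∃ rc, (∃ d ∈ pvOffsets, rc = (ele.1 + d.1, ele.2 + d.2)) ∧
        (0 ≤ rc.1 ∧ rc.1 < (grid.length : Int) ∧ 0 ≤ rc.2 ∧ rc.2 < (grid.length : Int)) ∧
        PySem.List.pyGetD (PySem.List.pyGetD grid rc.1 []) rc.2 0 = player)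
      ↔ ∃ rrow ∈ PySem.List.enumerate grid, ∃ cv ∈ PySem.List.enumerate (rrow.2.take grid.length),
          cv.2 = player ∧ ∃ d ∈ pvOffsets, ele = (rrow.1 + d.1, cv.1 + d.2)) := by
  constructor
  · rintro ⟨rc, ⟨d, hd, rfl⟩, ⟨h1, h2, h3, h4⟩, hval⟩
    dsimp only at h1 h2 h3 h4 hval
    have hk : (ele.1 + d.1).toNat < grid.length := by omega
    have hrow : PySem.List.pyGetD grid (ele.1 + d.1) [] = grid[(ele.1 + d.1).toNat] :=
      PySem.List.pyGetD_eq_getElem grid [] h1 (by exact_mod_cast h2)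
    have hjlen : (ele.2 + d.2).toNat < (grid[(ele.1 + d.1).toNat]).length := by
      have := hpre d hd h1 h2 h3 h4
      rw [List.getD_eq_getElem _ _ hk] at this
      omega
    have hval' : grid[(ele.1 + d.1).toNat][(ele.2 + d.2).toNat] = player := by
      rw [hrow] at hval
      rwa [PySem.List.pyGetD_eq_getElem _ 0 h3 (by omega)] at hval
    refine ⟨((ele.1 + d.1).toNat, grid[(ele.1 + d.1).toNat]),
      (PySem.List.mem_enumerate_iff _ _ _).mpr ⟨(ele.1 + d.1).toNat, hk, by simp⟩,
      ((ele.2 + d.2).toNat, grid[(ele.1 + d.1).toNat][(ele.2 + d.2).toNat]),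
      (PySem.List.mem_enumerate_iff _ _ _).mpr ⟨(ele.2 + d.2).toNat, by simp; omega, by
        simp [List.getElem_take]⟩, hval', (-d.1, -d.2), pv_neg_offsets hd, ?_⟩
    have e1 : ((ele.1 + d.1).toNat : Int) = ele.1 + d.1 := by omega
    have e2 : ((ele.2 + d.2).toNat : Int) = ele.2 + d.2 := by omega
    dsimp only
    rw [e1, e2]
    simp [Prod.ext_iff] <;> omega
  · rintro ⟨rrow, hrrow, cv, hcv, hplayer, d, hd, hele⟩
    rcases (PySem.List.mem_enumerate_iff _ _ _).mp hrrow with ⟨k, hk, rfl⟩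
    rcases (PySem.List.mem_enumerate_iff _ _ _).mp hcv with ⟨j, hj, rfl⟩
    simp only [zero_add] at hele hplayer hj ⊢
    have hj' := hj
    simp only [List.length_take] at hj'
    have hjg : j < grid[k].length := by omega
    have hjn : j < grid.length := by omega
    refine ⟨((k : Int), (j : Int)), ⟨(-d.1, -d.2), pv_neg_offsets hd, by
      rw [hele]; simp [Prod.ext_iff] <;> omega⟩,
      ⟨by dsimp only; omega, by dsimp only; omega, by dsimp only; omega, by dsimp only; omega⟩, ?_⟩
    dsimp only
    rw [PySem.List.pyGetD_eq_getElem grid [] (by omega) (by omega)]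
    simp only [Int.toNat_natCast]
    rw [PySem.List.pyGetD_eq_getElem _ 0 (by omega) (by exact_mod_cast hjg)]
    simp only [Int.toNat_natCast]
    rw [← hplayer]
    exact (List.getElem_take).symm

-- per-element agreement of the two keep-tests
set_option maxHeartbeats 1600000 in
theorem pv_keep_eq (grid : List (List Int)) (player : Int) (ele : Int × Int)
    (hpre : ∀ d ∈ pvOffsets,
      0 ≤ ele.1 + d.1 → ele.1 + d.1 < (grid.length : Int) →
      0 ≤ ele.2 + d.2 → ele.2 + d.2 < (grid.length : Int) →
      ele.2 + d.2 < ((grid.getD (ele.1 + d.1).toNat []).length : Int)) :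
    (!(adj_box grid [ele] false).any
        (fun rc => decide (PySem.List.pyGetD (PySem.List.pyGetD grid rc.1 []) rc.2 0 = player)))
      = !(PySem.Set.contains ((PySem.List.enumerate grid).foldl (fun fb rrow =>
          (PySem.List.enumerate (rrow.2.take grid.length)).foldl (fun fb cv =>
            if cv.2 = player then
              pvOffsets.foldl (fun fb d => PySem.Set.add fb (rrow.1 + d.1, cv.1 + d.2)) fb
            else fb) fb) PySem.Set.empty) ele) := by
  congr 1
  rw [Bool.eq_iff_iff, List.any_eq_true, PySem.Set.contains_iff, pv_mem_forbidden,
    ← pv_bridge grid player ele hpre]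
  have hbox : adj_box grid [ele] false =
      ([(ele.1 - 1, ele.2), (ele.1 - 1, ele.2 + 1), (ele.1, ele.2 - 1), (ele.1, ele.2 + 1),
        (ele.1 + 1, ele.2 - 1), (ele.1 + 1, ele.2)] : List (Int × Int)).foldl
        (fun acc rc => if 0 ≤ rc.1 ∧ rc.1 < (grid.length : Int) ∧ 0 ≤ rc.2 ∧
            rc.2 < (grid.length : Int) ∧ rc ∉ acc then acc ++ [rc] else acc) [] := rfl
  rw [hbox]
  constructor
  · rintro ⟨rc, hmem, hval⟩
    rw [pv_mem_adj_fold] at hmem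
    rcases hmem with h | ⟨htmp, hb⟩
    · simp at h
    · refine ⟨rc, ?_, hb, by simpa using hval⟩
      simp only [pvOffsets, List.mem_cons, List.not_mem_nil, or_false] at htmp ⊢
      rcases htmp with rfl | rfl | rfl | rfl | rfl | rfl
      · exact ⟨(-1, 0), by norm_num, by simp [Prod.ext_iff] <;> ring⟩
      · exact ⟨(-1, 1), by norm_num, by simp [Prod.ext_iff] <;> ring⟩
      · exact ⟨(0, -1), by norm_num, by simp [Prod.ext_iff] <;> ring⟩
      · exact ⟨(0, 1), by norm_num, by simp [Prod.ext_iff]⟩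
      · exact ⟨(1, -1), by norm_num, by simp [Prod.ext_iff] <;> ring⟩
      · exact ⟨(1, 0), by norm_num, by simp [Prod.ext_iff] <;> ring⟩
  · rintro ⟨rc, ⟨d, hd, rfl⟩, hb, hval⟩
    refine ⟨(ele.1 + d.1, ele.2 + d.2), ?_, by simpa using hval⟩
    rw [pv_mem_adj_fold]
    refine Or.inr ⟨?_, hb⟩
    simp only [pvOffsets, List.mem_cons, List.not_mem_nil, or_false] at hd
    rcases hd with rfl | rfl | rfl | rfl | rfl | rfl <;>
      simp [Prod.ext_iff] <;> ring_nf <;> simp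

-- A's accumulator loop is a filter by the per-element keep-test
theorem pv_A_filter (grid : List (List Int)) (player : Int) (l : List (Int × Int)) (lf : List (Int × Int)) :
    (l.foldl (fun st ele =>
      let play_box := adj_box grid [ele] false
      let test := play_box.foldl (fun t rc =>
        if PySem.List.pyGetD (PySem.List.pyGetD grid rc.1 []) rc.2 0 = player ∧ t = true then false else t) st.1
      ((true : Bool), if test = true then st.2 ++ [ele] else st.2)) ((true : Bool), lf)).2
    = lf ++ l.filter (fun ele => !(adj_box grid [ele] false).any
        (fun rc => decide (PySem.List.pyGetD (PySem.List.pyGetD grid rc.1 []) rc.2 0 = player))) := by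
  induction l generalizing lf with
  | nil => simp
  | cons a l ih =>
    rw [List.foldl_cons]
    show (l.foldl _ ((true : Bool),
        if (adj_box grid [a] false).foldl (fun t rc =>
            if PySem.List.pyGetD (PySem.List.pyGetD grid rc.1 []) rc.2 0 = player ∧ t = true
            then false else t) true = true
        then lf ++ [a] else lf)).2 = _
    rw [pv_sticky, Bool.true_and, ih]
    by_cases h : (adj_box grid [a] false).any
        (fun rc => decide (PySem.List.pyGetD (PySem.List.pyGetD grid rc.1 []) rc.2 0 = player)) = true
    · simp [h]
    · simp only [Bool.not_eq_true] at h
      simp [h]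

-- ===== VERDICT (by name: the statement is the Claim_ definition above) =====
theorem adj_box_player_spec : Claim_equal_adj_box_player := by
  intro grid list_cell player _hdom hpre
  show adj_box_player grid list_cell player = adj_box_player_alt grid list_cell player
  unfold adj_box_player adj_box_player_alt
  rw [pv_A_filter]
  simp only [List.nil_append]
  exact List.filter_congr (fun ele hele => pv_keep_eq grid player ele (hpre ele hele))
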